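-- pv_equiv track=rewrite | github.com/KrishnaKumar-ADS/ai-codebase-intelligence | backend/reasoning/prompt_templates.py | _truncate_content
-- ===== SOURCE A (Python) =====
-- def _truncate_content(content: str, max_chars: int) -> str:
-- 	if len(content) <= max_chars:
-- 		return content
--
-- 	lines = content.splitlines()
-- 	kept: list[str] = []
-- 	total = 0
-- 	for line in lines:
-- 		if total + len(line) + 1 > max_chars:
-- 			break
-- 		kept.append(line)
-- 		total += len(line) + 1
--
-- 	truncated_lines = len(lines) - len(kept)
-- 	note = f"\n... [{truncated_lines} lines truncated - content too large for context window]"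
-- 	return "\n".join(kept) + note
-- ===== SOURCE B (Python) =====
-- def _bisect_right(a, x):
--     lo, hi = 0, len(a)
--     while lo < hi:
--         mid = (lo + hi) // 2
--         if x < a[mid]:
--             hi = mid
--         else:
--             lo = mid + 1
--     return lo
--
--
-- def _truncate_content(content: str, max_chars: int) -> str:
--     if len(content) <= max_chars:
--         return content
--
--     lines = content.splitlines()
--     cumulative = []
--     total = 0
--     for line in lines:
--         total += len(line) + 1
--         cumulative.append(total)
--     idx = _bisect_right(cumulative, max_chars)
--
--     note = f"\n... [{len(lines) - idx} lines truncated - content too large for context window]"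
--     return "\n".join(lines[:idx]) + note
-- ===== Notes on version B (the rewrite author's own statement) =====
-- stated objective: alternative
-- what changed: Replaces A's break-out accumulation loop (which builds the kept list while summing) by a wholesale pass computing per-line prefix-sum costs, a hand-written bisect_right binary search over those prefix sums to find the cutoff index, and a single slice lines[:idx].
import Mathlib
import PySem

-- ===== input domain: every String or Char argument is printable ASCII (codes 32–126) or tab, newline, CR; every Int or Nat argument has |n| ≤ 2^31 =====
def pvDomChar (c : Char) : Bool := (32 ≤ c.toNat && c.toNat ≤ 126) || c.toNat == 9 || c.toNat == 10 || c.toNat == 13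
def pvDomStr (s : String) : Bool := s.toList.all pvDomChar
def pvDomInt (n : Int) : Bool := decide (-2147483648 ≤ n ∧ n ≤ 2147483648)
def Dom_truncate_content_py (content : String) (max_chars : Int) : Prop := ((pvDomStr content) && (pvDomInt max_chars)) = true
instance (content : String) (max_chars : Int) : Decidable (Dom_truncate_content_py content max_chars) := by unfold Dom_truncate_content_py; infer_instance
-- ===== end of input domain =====

-- B replaces A's break-out accumulation loop by prefix sums + a binary search (bisect_right) + one slice; alternative decomposition, same O(n) cost.

-- ===== PORT A =====
-- A's for-loop with break, as structural recursion over the lines with the running total as state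
def pvKeepLoop (lines : List String) (total : Int) (max_chars : Int) : List String :=
  match lines with
  | [] => []
  | l :: rest =>
    if total + PySem.Str.len l + 1 > max_chars then []
    else l :: pvKeepLoop rest (total + PySem.Str.len l + 1) max_chars

def truncate_content_py (content : String) (max_chars : Int) : String :=
  if PySem.Str.len content ≤ max_chars then content
  else
    let lines := PySem.Str.splitlines content
    let kept := pvKeepLoop lines 0 max_chars
    let truncated_lines : Int := (lines.length : Int) - (kept.length : Int)
    let note := "\n... [" ++ PySem.Int.toStr truncated_lines ++ " lines truncated - content too large for context window]"
    PySem.Str.join "\n" kept ++ note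

-- ===== PORT B =====
-- Source B's cumulative-total loop (append running total per line)
def pvAccum (costs : List Int) (total : Int) : List Int :=
  match costs with
  | [] => []
  | c :: rest => (total + c) :: pvAccum rest (total + c)

-- Source B's hand-written _bisect_right while-loop
def pvBisectRight (a : List Int) (x : Int) (lo hi : Nat) : Nat :=
  if lo < hi then
    let mid := (lo + hi) / 2
    if x < PySem.List.pyGetD a (mid : Int) 0 then pvBisectRight a x lo mid
    else pvBisectRight a x (mid + 1) hi
  else lo
termination_by hi - lo
decreasing_by all_goals omega

def truncate_content_py_alt (content : String) (max_chars : Int) : String :=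
  if PySem.Str.len content ≤ max_chars then content
  else
    let lines := PySem.Str.splitlines content
    let cumulative := pvAccum (lines.map (fun l => PySem.Str.len l + 1)) 0
    let idx := pvBisectRight cumulative max_chars 0 cumulative.length
    let note := "\n... [" ++ PySem.Int.toStr ((lines.length : Int) - (idx : Int)) ++ " lines truncated - content too large for context window]"
    PySem.Str.join "\n" (PySem.List.slice lines none (some (idx : Int))) ++ note

-- ===== PRECONDITION & SPEC =====
def Spec_truncate_content_py (content : String) (max_chars : Int) (out : String) : Prop := out = truncate_content_py_alt content max_chars
instance (content : String) (max_chars : Int) (out : String) : Decidable (Spec_truncate_content_py content max_chars out) := by unfold Spec_truncate_content_py; infer_instance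

-- ===== CLAIM (what is proved, stated in full; the proofs are below) =====
def Claim_equal_truncate_content_py : Prop := ∀ (content : String) (max_chars : Int), Dom_truncate_content_py content max_chars → Spec_truncate_content_py content max_chars (truncate_content_py content max_chars)

-- ===== LEMMAS AND PROOFS =====

-- every entry of pvAccum costs total exceeds total when all costs are ≥ 1
theorem pvAccum_gt (costs : List Int) (total : Int)
    (hc : ∀ c ∈ costs, 1 ≤ c) : ∀ y ∈ pvAccum costs total, total < y := by
  induction costs generalizing total with
  | nil => intro y hy; simp [pvAccum] at hy
  | cons c rest ih =>
    intro y hy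
    have hc1 : 1 ≤ c := hc c (by simp)
    simp only [pvAccum, List.mem_cons] at hy
    rcases hy with rfl | hy
    · omega
    · have := ih (total + c) (fun d hd => hc d (by simp [hd])) y hy
      omega

theorem pvAccum_length (costs : List Int) (total : Int) :
    (pvAccum costs total).length = costs.length := by
  induction costs generalizing total with
  | nil => simp [pvAccum]
  | cons c rest ih => simp [pvAccum, ih]

theorem pvAccum_sorted (costs : List Int) (total : Int)
    (hc : ∀ c ∈ costs, 1 ≤ c) : (pvAccum costs total).Pairwise (· ≤ ·) := by
  induction costs generalizing total with
  | nil => simp [pvAccum]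
  | cons c rest ih =>
    have hcrest : ∀ d ∈ rest, 1 ≤ d := fun d hd => hc d (by simp [hd])
    refine List.Pairwise.cons ?_ (ih (total + c) hcrest)
    intro y hy
    exact le_of_lt (pvAccum_gt rest (total + c) hcrest y hy)

-- a list whose elements ≤ x are exactly those at indices < k has countP (· ≤ x) = k
theorem countP_le_eq (a : List Int) (x : Int) (k : Nat) (hk : k ≤ a.length)
    (hl : ∀ i (h : i < a.length), i < k → a[i] ≤ x)
    (hr : ∀ i (h : i < a.length), k ≤ i → x < a[i]) :
    a.countP (fun t => t ≤ x) = k := by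
  have hsplit : a = a.take k ++ a.drop k := (List.take_append_drop k a).symm
  rw [hsplit, List.countP_append]
  have h1 : (a.take k).countP (fun t => t ≤ x) = k := by
    have hall : ∀ b ∈ a.take k, (fun t : Int => decide (t ≤ x)) b = true := by
      intro b hb
      obtain ⟨i, hi, rfl⟩ := List.mem_iff_getElem.mp hb
      have hik : i < k := by
        have := hi; simp [List.length_take] at this; omega
      have hia : i < a.length := by
        have := hi; simp [List.length_take] at this; omega
      have : (a.take k)[i] = a[i] := List.getElem_take
      rw [this]
      simpa using hl i hia hik
    rw [List.countP_eq_length.mpr hall, List.length_take]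
    omega
  have h2 : (a.drop k).countP (fun t => t ≤ x) = 0 := by
    refine List.countP_eq_zero.mpr ?_
    intro b hb
    obtain ⟨i, hi, rfl⟩ := List.mem_iff_getElem.mp hb
    have hia : k + i < a.length := by
      have := hi; simp [List.length_drop] at this; omega
    have : (a.drop k)[i] = a[k + i] := by
      simp [List.getElem_drop]
    rw [this]
    simpa using not_le.mpr (hr (k + i) hia (by omega))
  omega

-- bisect_right on a nondecreasing list counts the elements ≤ x
theorem pvBisectRight_correct (n : ℕ) (a : List Int) (x : Int) (lo hi : Nat)
    (hn : hi - lo ≤ n)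
    (hlo : lo ≤ hi) (hhi : hi ≤ a.length)
    (hs : a.Pairwise (· ≤ ·))
    (hl : ∀ i (h : i < a.length), i < lo → a[i] ≤ x)
    (hr : ∀ i (h : i < a.length), hi ≤ i → x < a[i]) :
    pvBisectRight a x lo hi = a.countP (fun t => t ≤ x) := by
  have hs' := List.pairwise_iff_getElem.mp hs
  induction n generalizing lo hi with
  | zero =>
    have heq : lo = hi := by omega
    rw [pvBisectRight, if_neg (by omega)]
    exact (countP_le_eq a x lo (by omega) hl (fun i h hge => hr i h (by omega))).symm
  | succ n ih =>
    by_cases hlt : lo < hi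
    · rw [pvBisectRight, if_pos hlt]
      have hmidlo : lo ≤ (lo + hi) / 2 := by omega
      have hmidhi : (lo + hi) / 2 < hi := by omega
      have hmida : (lo + hi) / 2 < a.length := by omega
      have hget : PySem.List.pyGetD a (((lo + hi) / 2 : Nat) : Int) 0 = a[(lo + hi) / 2] := by
        rw [PySem.List.pyGetD_natCast]
        exact List.getD_eq_getElem a 0 hmida
      show (if x < PySem.List.pyGetD a ((((lo + hi) / 2 : Nat)) : Int) 0
          then pvBisectRight a x lo ((lo + hi) / 2)
          else pvBisectRight a x ((lo + hi) / 2 + 1) hi) = List.countP (fun t => decide (t ≤ x)) a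
      rw [hget]
      by_cases hx : x < a[(lo + hi) / 2]
      · rw [if_pos hx]
        refine ih lo ((lo + hi) / 2) (by omega) hmidlo (by omega) hl ?_
        intro i h hge
        rcases Nat.lt_or_ge ((lo + hi) / 2) i with hlt2 | hge2
        · exact lt_of_lt_of_le hx (hs' ((lo + hi) / 2) i hmida h hlt2)
        · have : i = (lo + hi) / 2 := by omega
          subst this; exact hx
      · rw [if_neg hx]
        replace hx := not_lt.mp hx
        refine ih ((lo + hi) / 2 + 1) hi (by omega) (by omega) hhi ?_ hr
        intro i h hle
        rcases Nat.lt_or_ge i ((lo + hi) / 2) with hlt2 | hge2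
        · exact le_trans (hs' i ((lo + hi) / 2) h hmida hlt2) hx
        · have : i = (lo + hi) / 2 := by omega
          subst this; exact hx
    · have heq : lo = hi := by omega
      rw [pvBisectRight, if_neg hlt]
      exact (countP_le_eq a x lo (by omega) hl (fun i h hge => hr i h (by omega))).symm

-- A's break loop keeps exactly the prefix of lines whose running totals stay ≤ max_chars
theorem pvKeepLoop_eq_take (lines : List String) (total max_chars : Int) :
    pvKeepLoop lines total max_chars =
      lines.take ((pvAccum (lines.map (fun l => PySem.Str.len l + 1)) total).countP
        (fun t => t ≤ max_chars)) := by
  induction lines generalizing total with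
  | nil => simp [pvKeepLoop, pvAccum]
  | cons l rest ih =>
    have hc : ∀ c ∈ rest.map (fun l => PySem.Str.len l + 1), 1 ≤ c := by
      intro c hcm
      simp only [List.mem_map] at hcm
      obtain ⟨s, _, rfl⟩ := hcm
      simp [PySem.Str.len_eq]
    simp only [pvKeepLoop, List.map_cons, pvAccum]
    by_cases h : total + PySem.Str.len l + 1 > max_chars
    · rw [if_pos h]
      have htail : ∀ y ∈ pvAccum (rest.map (fun l => PySem.Str.len l + 1))
          (total + (PySem.Str.len l + 1)), ¬ (y ≤ max_chars) := by
        intro y hy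
        have := pvAccum_gt _ _ hc y hy
        omega
      rw [List.countP_cons, List.countP_eq_zero.mpr (by intro y hy; simpa using htail y hy)]
      have hd : decide (total + (PySem.Str.len l + 1) ≤ max_chars) = false :=
        decide_eq_false (by omega)
      rw [hd]
      simp
    · rw [if_neg h]
      have hyes : total + (PySem.Str.len l + 1) ≤ max_chars := by omega
      rw [List.countP_cons]
      simp only [hyes, decide_true, if_pos, List.take_succ_cons]
      rw [show total + PySem.Str.len l + 1 = total + (PySem.Str.len l + 1) by ring]
      exact congrArg _ (ih (total + (PySem.Str.len l + 1)))

-- ===== VERDICT (by name: the statement is the Claim_ definition above) =====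
theorem truncate_content_py_spec : Claim_equal_truncate_content_py := by
  intro content max_chars _
  unfold Spec_truncate_content_py truncate_content_py truncate_content_py_alt
  by_cases h : PySem.Str.len content ≤ max_chars
  · rw [if_pos h, if_pos h]
  · rw [if_neg h, if_neg h]
    dsimp only
    set lines := PySem.Str.splitlines content with hlines
    set costs := lines.map (fun l => PySem.Str.len l + 1) with hcosts
    have hc : ∀ c ∈ costs, 1 ≤ c := by
      intro c hcm
      simp only [hcosts, List.mem_map] at hcm
      obtain ⟨s, _, rfl⟩ := hcm
      simp [PySem.Str.len_eq]
    set cum := pvAccum costs 0 with hcum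
    have hlen : cum.length = lines.length := by
      rw [hcum, pvAccum_length, hcosts, List.length_map]
    have hb : pvBisectRight cum max_chars 0 cum.length
        = cum.countP (fun t => t ≤ max_chars) :=
      pvBisectRight_correct cum.length cum max_chars 0 cum.length (by omega) (by omega)
        (le_refl _) (pvAccum_sorted costs 0 hc)
        (by intro i hh hi0; omega) (by intro i hh hle; omega)
    set k := cum.countP (fun t => t ≤ max_chars) with hkdef
    have hkle : k ≤ lines.length := by
      have := List.countP_le_length (p := fun t : Int => decide (t ≤ max_chars)) (l := cum)
      omega
    have hkeep : pvKeepLoop lines 0 max_chars = lines.take k :=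
      pvKeepLoop_eq_take lines 0 max_chars
    have hkeeplen : (pvKeepLoop lines 0 max_chars).length = k := by
      rw [hkeep, List.length_take]
      omega
    have hslice : PySem.List.slice lines none (some ((pvBisectRight cum max_chars 0 cum.length : Nat) : Int))
        = lines.take k := by
      rw [PySem.List.slice_to_natCast, hb]
    rw [hkeeplen, hkeep, hslice, hb]
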